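-- pv_equiv track=rewrite | github.com/Lachtan9K/Codes-of-Advent-of-Code-2025---VD | DAY6/day6_part2.py | solve
-- ===== SOURCE A (Python) =====
-- def solve(lines):
--     lines = [x.rstrip("\n") for x in lines if x.strip("\n") != ""]
--     rows = [list(x) for x in lines]
--     h = len(rows)
--     w = max(len(r) for r in rows)
--     for r in rows:
--         if len(r) < w:
--             r.extend([" "] * (w - len(r)))
--
--     sep = [all(rows[i][j] == " " for i in range(h)) for j in range(w)]
--
--     blocks = []
--     j = 0
--     while j < w:
--         while j < w and sep[j]:
--             j += 1
--         if j >= w: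
--             break
--         start = j
--         while j < w and not sep[j]:
--             j += 1
--         end = j
--         blocks.append((start, end))
--
--     total = 0
--     for start, end in blocks:
--         op_row = rows[-1][start:end]
--         op = next((c for c in op_row if c != " "), None)
--         nums = []
--         for col in range(end - 1, start - 1, -1):
--             s = "".join(rows[r][col] for r in range(h - 1)).strip()
--             if s:
--                 nums.append(int(s))
--         if op == "+":
--             total += sum(nums)
--         else:
--             p = 1
--             for x in nums:
--                 p *= x
--             total += p
--
--     return total
-- ===== SOURCE B (Python) =====
-- def solve(lines):
--     lines = [x.rstrip("\n") for x in lines if x.strip("\n") != ""]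
--     w = max(len(x) for x in lines)
--     total = 0
--     in_block, op, s, p = False, None, 0, 1
--     for j in range(w):
--         col = [line[j] if j < len(line) else " " for line in lines]
--         if all(c == " " for c in col):
--             if in_block:
--                 total += s if op == "+" else p
--             in_block, op, s, p = False, None, 0, 1
--         else:
--             if op is None and col[-1] != " ":
--                 op = col[-1]
--             num = "".join(col[:-1]).strip()
--             if num:
--                 n = int(num)
--                 s += n
--                 p *= n
--             in_block = True
--     if in_block:
--         total += s if op == "+" else p
--     return total
-- ===== Notes on version B (the rewrite author's own statement) =====
-- stated objective: alternative
-- what changed: A makes staged passes (build a sep[] array, collect (start,end) block pairs with nested index while-loops, then per block gather a nums list right-to-left and reduce it); B is a single left-to-right pass over the columns with an accumulator state machine (total, in_block, op, s, p) that maintains the running sum AND product of the current block simultaneously and flushes one of them at each blank column, building no separator array, no block list and no nums list.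
import Mathlib
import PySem

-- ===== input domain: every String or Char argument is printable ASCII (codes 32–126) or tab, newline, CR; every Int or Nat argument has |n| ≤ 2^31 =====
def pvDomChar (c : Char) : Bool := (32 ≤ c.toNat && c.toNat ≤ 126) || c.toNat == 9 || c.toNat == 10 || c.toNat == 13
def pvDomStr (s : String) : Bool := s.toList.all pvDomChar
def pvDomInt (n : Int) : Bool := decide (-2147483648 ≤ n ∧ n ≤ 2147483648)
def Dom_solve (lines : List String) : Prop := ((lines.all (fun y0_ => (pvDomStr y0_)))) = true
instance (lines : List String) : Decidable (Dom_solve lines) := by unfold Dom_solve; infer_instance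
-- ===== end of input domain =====

-- B replaces A's staged passes (separator array, (start,end) block list, per-block nums
-- list) by ONE left-to-right pass over the columns with an accumulator state machine that
-- maintains the running sum AND product of the current block simultaneously and flushes at
-- each blank column (objective: alternative decomposition, no intermediate lists).

-- ===== PORT A =====
-- shared helper: the identical first line of both Pythons,
-- `[x.rstrip("\n") for x in lines if x.strip("\n") != ""]` as List Char rows.
-- x.rstrip("\n"): drop trailing '\n' characters (exact; PySem has no rstrip-with-chars)
def rstripNl (cs : List Char) : List Char := (cs.reverse.dropWhile (· == '\n')).reverse

def cleanLines (lines : List String) : List (List Char) :=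
  (lines.filter (fun x => PySem.Chars.stripChars x.toList ['\n'] != [])).map
    (fun x => rstripNl x.toList)

-- max(len(r) for r in rows): max() raises on an empty sequence (excluded by Pre_);
-- on a nonempty one all lengths are ≥ 0, so folding max from 0 computes it exactly.
def padWidth (lns : List (List Char)) : Nat := (lns.map List.length).foldl max 0

-- `while j < w and sep[j] == b: j += 1` (A's two inner while loops, b = true / false)
def skipWhile (sep : List Bool) (w : Nat) (b : Bool) (j : Nat) : Nat :=
  if _h : j < w ∧ sep.getD j false = b then skipWhile sep w b (j + 1) else j
termination_by w - j
decreasing_by omega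

-- the three skipWhile facts blocksLoop's termination proof cites
theorem skipWhile_le (sep : List Bool) (w : Nat) (b : Bool) (j : Nat) :
    j ≤ skipWhile sep w b j := by
  fun_induction skipWhile sep w b j with
  | case1 j h ih => omega
  | case2 j h => omega

theorem skipWhile_post (sep : List Bool) (w : Nat) (b : Bool) (j : Nat) :
    ¬ (skipWhile sep w b j < w ∧ sep.getD (skipWhile sep w b j) false = b) := by
  fun_induction skipWhile sep w b j with
  | case1 j h ih => exact ih
  | case2 j h => exact h

theorem skipWhile_succ_le (sep : List Bool) (w : Nat) (b : Bool) (j : Nat)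
    (hj : j < w) (hb : sep.getD j false = b) : j + 1 ≤ skipWhile sep w b j := by
  rw [skipWhile, dif_pos ⟨hj, hb⟩]
  exact skipWhile_le sep w b (j + 1)

-- A's outer `while j < w` loop producing the (start, end) block pairs
def blocksLoop (sep : List Bool) (w : Nat) (j : Nat) : List (Nat × Nat) :=
  let j1 := skipWhile sep w true j
  if _h : j1 < w then
    let j2 := skipWhile sep w false j1
    (j1, j2) :: blocksLoop sep w j2
  else []
termination_by w - j
decreasing_by
  have h1 := skipWhile_le sep w true j
  have h2 := skipWhile_post sep w true j
  have h3 : sep.getD (skipWhile sep w true j) false = false := by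
    rcases Bool.eq_false_or_eq_true (sep.getD (skipWhile sep w true j) false) with h | h
    · exact absurd ⟨_h, h⟩ h2
    · exact h
  have h4 := skipWhile_succ_le sep w false (skipWhile sep w true j) _h h3
  omega

def solve (lines : List String) : Int :=
  let lns := cleanLines lines
  let h := lns.length
  let w := padWidth lns
  -- r.extend([" "] * (w - len(r)))
  let rows := lns.map (fun r => r ++ List.replicate (w - r.length) ' ')
  -- sep = [all(rows[i][j] == " " for i in range(h)) for j in range(w)]
  -- (rows[i][j] via getD: i < h and j < w are always in range after padding)
  let sep := (List.range w).map
    (fun j => (List.range h).all (fun i => (rows.getD i []).getD j ' ' == ' '))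
  let blocks := blocksLoop sep w 0
  blocks.foldl (fun total se =>
    -- op_row = rows[-1][start:end]; rows[-1] = rows[h-1] since h ≥ 1 on Pre_
    let opRow := PySem.List.slice (rows.getD (h - 1) []) (some (se.1 : Int)) (some (se.2 : Int))
    -- next((c for c in op_row if c != " "), None)
    let op := opRow.find? (fun c => c != ' ')
    -- for col in range(end - 1, start - 1, -1): …
    let nums := (PySem.List.pyRange ((se.2 : Int) - 1) ((se.1 : Int) - 1) (-1)).foldl
      (fun ns col =>
        -- s = "".join(rows[r][col] for r in range(h - 1)).strip()
        -- (col ≥ 0 here, so .toNat is exact; rows[r][col] via getD is in range)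
        let s := PySem.Chars.strip (PySem.Chars.join []
          ((List.range (h - 1)).map (fun r => [(rows.getD r []).getD col.toNat ' '])))
        -- int(s) raises ValueError when s does not parse (excluded by Pre_)
        if s != [] then ns ++ [(PySem.Int.ofChars? s).getD 0] else ns) []
    total + (if op == some '+' then nums.sum else nums.foldl (· * ·) 1)) 0

-- ===== PORT B =====
-- column j of the grid: [line[j] if j < len(line) else " " for line in lines]
def colAt (lns : List (List Char)) (j : Nat) : List Char :=
  lns.map (fun line => line.getD j ' ')

-- B's loop state: total, in_block, op, s, p
structure BState where
  total : Int
  inBlock : Bool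
  op : Option Char
  s : Int
  p : Int
deriving Repr, DecidableEq

-- one iteration of B's `for j in range(w)` loop body
def bStep (st : BState) (col : List Char) : BState :=
  if col.all (fun c => c == ' ') then
    { total := if st.inBlock then st.total + (if st.op == some '+' then st.s else st.p)
               else st.total,
      inBlock := false, op := none, s := 0, p := 1 }
  else
    -- col[-1]: col is nonempty whenever the loop runs (h ≥ 1 on Pre_), so getD is exact
    let last := col.getD (col.length - 1) ' '
    let op := if st.op == none && last != ' ' then some last else st.op
    -- num = "".join(col[:-1]).strip(); int(num) raises on garbage (excluded by Pre_)
    let num := PySem.Chars.strip col.dropLast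
    if num != [] then
      let n := (PySem.Int.ofChars? num).getD 0
      { total := st.total, inBlock := true, op := op, s := st.s + n, p := st.p * n }
    else
      { total := st.total, inBlock := true, op := op, s := st.s, p := st.p }

-- the trailing `if in_block: total += s if op == "+" else p`
def bFinish (st : BState) : Int :=
  if st.inBlock then st.total + (if st.op == some '+' then st.s else st.p) else st.total

def solve_alt (lines : List String) : Int :=
  let lns := cleanLines lines
  let w := padWidth lns
  bFinish (((List.range w).map (fun j => colAt lns j)).foldl bStep
    { total := 0, inBlock := false, op := none, s := 0, p := 1 })

-- ===== PRECONDITION & SPEC =====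
-- Pre_ excludes exactly the inputs on which Python A raises: no non-blank line at all
-- (ValueError from max()), or a column whose upper part strips to a non-empty string
-- that int() cannot parse (ValueError).
def Pre_solve (lines : List String) : Prop :=
  cleanLines lines ≠ [] ∧
  ∀ j < padWidth (cleanLines lines),
    PySem.Chars.strip ((colAt (cleanLines lines) j).dropLast) ≠ [] →
    (PySem.Int.ofChars? (PySem.Chars.strip ((colAt (cleanLines lines) j).dropLast))).isSome

instance (lines : List String) : Decidable (Pre_solve lines) := by
  unfold Pre_solve; infer_instance

def pvWitness_solve : List String := ["1 2", "3 4", "+ *"]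

def Spec_solve (lines : List String) (out : Int) : Prop := out = solve_alt lines
instance (lines : List String) (out : Int) : Decidable (Spec_solve lines out) := by
  unfold Spec_solve; infer_instance

-- ===== CLAIM (what is proved, stated in full; the proofs are below) =====
def Claim_equal_solve : Prop :=
  ∀ (lines : List String), Dom_solve lines → Pre_solve lines → Spec_solve lines (solve lines)

-- ===== LEMMAS AND PROOFS =====

-- blank column test, and the reference run-splitting both sides are reduced to
def blankB (c : List Char) : Bool := PySem.Chars.stripChars c [' '] == []

def runs (cols : List (List Char)) : List (List (List Char)) :=
  match cols with
  | [] => []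
  | c :: t =>
    if blankB c then runs t
    else (c :: t.takeWhile (fun d => !blankB d)) :: runs (t.dropWhile (fun d => !blankB d))
termination_by cols.length
decreasing_by
  · simp
  · have := List.length_dropWhile_le (fun d => !blankB d) t
    simp; omega

theorem runs_nil : runs [] = [] := by rw [runs.eq_def]

theorem runs_cons_blank (c : List Char) (t : List (List Char)) (hb : blankB c = true) :
    runs (c :: t) = runs t := by rw [runs.eq_def]; simp [hb]

theorem runs_cons_nonblank (c : List Char) (t : List (List Char)) (hb : blankB c = false) :
    runs (c :: t) = (c :: t.takeWhile (fun d => !blankB d)) ::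
      runs (t.dropWhile (fun d => !blankB d)) := by rw [runs.eq_def]; simp [hb]

theorem blankB_iff (c : List Char) : blankB c = true ↔ ∀ x ∈ c, x = ' ' := by
  unfold blankB
  simp only [PySem.Chars.stripChars, beq_iff_eq, List.reverse_eq_nil_iff,
    List.dropWhile_eq_nil_iff, List.mem_reverse]
  constructor
  · intro h x hx
    rcases List.mem_append.mp
        ((List.takeWhile_append_dropWhile
          (p := fun c => [' '].contains c) (l := c)) ▸ hx) with h1 | h2
    · simpa using List.mem_takeWhile_imp h1
    · simpa using h x h2
  · intro h x hx
    simpa using h x ((List.dropWhile_suffix _).mem hx)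

theorem blankB_eq_all (c : List Char) : blankB c = c.all (fun x => x == ' ') := by
  rw [Bool.eq_iff_iff, blankB_iff, List.all_eq_true]
  simp

-- per-block value, the common reference point of both proofs
def opOf (b : List (List Char)) : Option Char :=
  (b.map (fun c => c.getD (c.length - 1) ' ')).find? (fun ch => ch != ' ')

def numsOf (b : List (List Char)) : List Int :=
  (b.filter (fun c => PySem.Chars.strip c.dropLast != [])).map
    (fun c => (PySem.Int.ofChars? (PySem.Chars.strip c.dropLast)).getD 0)

def blockValue (b : List (List Char)) : Int :=
  if opOf b == some '+' then (numsOf b).sum else (numsOf b).prod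

-- the computed pieces of A, named (definitionally equal to solve's let-bound values)
def rowsOf (lns : List (List Char)) : List (List Char) :=
  lns.map (fun r => r ++ List.replicate (padWidth lns - r.length) ' ')

def sepOf (lns : List (List Char)) : List Bool :=
  (List.range (padWidth lns)).map
    (fun j => (List.range lns.length).all (fun i => ((rowsOf lns).getD i []).getD j ' ' == ' '))

def colsOf (lns : List (List Char)) : List (List Char) :=
  (List.range (padWidth lns)).map (fun j => colAt lns j)

-- A's per-block value
def valA (lns : List (List Char)) (se : Nat × Nat) : Int :=
  let h := lns.length
  let opRow := PySem.List.slice ((rowsOf lns).getD (h - 1) [])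
    (some (se.1 : Int)) (some (se.2 : Int))
  let op := opRow.find? (fun c => c != ' ')
  let nums := (PySem.List.pyRange ((se.2 : Int) - 1) ((se.1 : Int) - 1) (-1)).foldl
    (fun ns col =>
      let s := PySem.Chars.strip (PySem.Chars.join []
        ((List.range (h - 1)).map (fun r => [((rowsOf lns).getD r []).getD col.toNat ' '])))
      if s != [] then ns ++ [(PySem.Int.ofChars? s).getD 0] else ns) []
  if op == some '+' then nums.sum else nums.foldl (· * ·) 1

theorem solve_eq (lines : List String) :
    solve lines = (blocksLoop (sepOf (cleanLines lines)) (padWidth (cleanLines lines)) 0).foldl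
      (fun total se => total + valA (cleanLines lines) se) 0 := rfl

theorem lens_le (lns : List (List Char)) (r : List Char) (hr : r ∈ lns) :
    r.length ≤ padWidth lns :=
  (PySem.List.le_foldl_max (lns.map List.length) 0).2 r.length (List.mem_map_of_mem hr)

-- padded row indexing agrees with raw indexing below width w
theorem pad_getD (r : List Char) (w j : Nat) (hr : r.length ≤ w) (hj : j < w) :
    (r ++ List.replicate (w - r.length) ' ').getD j ' ' = r.getD j ' ' := by
  have hlen : (r ++ List.replicate (w - r.length) ' ').length = w := by
    simp; omega
  by_cases hlt : j < r.length
  · rw [List.getD_eq_getElem _ ' ' (show j < (r ++ List.replicate (w - r.length) ' ').length by omega),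
      List.getElem_append_left hlt, List.getD_eq_getElem _ _ hlt]
  · rw [List.getD_eq_getElem _ ' ' (show j < (r ++ List.replicate (w - r.length) ' ').length by omega),
      List.getElem_append_right (by omega), List.getD_eq_default _ _ (by omega)]
    simp

theorem rows_getD (lns : List (List Char)) (i : Nat) (hi : i < lns.length) :
    (rowsOf lns).getD i [] = lns[i] ++ List.replicate (padWidth lns - lns[i].length) ' ' := by
  have hlt : i < (rowsOf lns).length := by simpa [rowsOf] using hi
  rw [List.getD_eq_getElem _ [] hlt]
  simp [rowsOf]

theorem rows_len (lns : List (List Char)) (i : Nat) (hi : i < lns.length) :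
    ((rowsOf lns).getD i []).length = padWidth lns := by
  rw [rows_getD lns i hi]
  have := lens_le lns lns[i] (List.getElem_mem hi)
  simp; omega

theorem cell_eq (lns : List (List Char)) (i j : Nat) (hi : i < lns.length)
    (hj : j < padWidth lns) :
    ((rowsOf lns).getD i []).getD j ' ' = (lns[i]).getD j ' ' := by
  rw [rows_getD lns i hi]
  exact pad_getD lns[i] (padWidth lns) j (lens_le lns lns[i] (List.getElem_mem hi)) hj

theorem colAt_len (lns : List (List Char)) (j : Nat) : (colAt lns j).length = lns.length := by
  simp [colAt]

theorem colAt_getD (lns : List (List Char)) (i j : Nat) (hi : i < lns.length) :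
    (colAt lns j).getD i ' ' = (lns[i]).getD j ' ' := by
  rw [colAt, List.getD_eq_getElem _ _ (by simpa using hi), List.getElem_map]

theorem sep_getD (lns : List (List Char)) (j : Nat) (hj : j < padWidth lns) :
    (sepOf lns).getD j false = blankB (colAt lns j) := by
  have hlt : j < (sepOf lns).length := by simpa [sepOf] using hj
  rw [List.getD_eq_getElem _ false hlt]
  rw [Bool.eq_iff_iff, blankB_iff]
  simp only [sepOf, List.getElem_map, List.getElem_range, List.all_eq_true,
    List.mem_range, beq_iff_eq, colAt, List.mem_map]
  constructor
  · rintro h x ⟨line, hline, rfl⟩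
    obtain ⟨i, hi, rfl⟩ := List.mem_iff_getElem.mp hline
    rw [← cell_eq lns i j hi hj]
    exact h i hi
  · intro h i hi
    rw [cell_eq lns i j hi hj]
    exact h _ ⟨lns[i], List.getElem_mem hi, rfl⟩

theorem cols_getElem (lns : List (List Char)) (j : Nat) (hj : j < padWidth lns) :
    (colsOf lns)[j]'(by simpa [colsOf] using hj) = colAt lns j := by
  simp [colsOf]

theorem cols_len (lns : List (List Char)) : (colsOf lns).length = padWidth lns := by
  simp [colsOf]

theorem skipWhile_le_w (sep : List Bool) (w : Nat) (b : Bool) (j : Nat) (hj : j ≤ w) :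
    skipWhile sep w b j ≤ w := by
  fun_induction skipWhile sep w b j with
  | case1 j h ih => exact ih (by omega)
  | case2 j h => exact hj

-- skipWhile over the non-blank run, characterised by takeWhile on the column list
theorem skipFalse (lns : List (List Char)) :
    ∀ n j, padWidth lns - j = n → j ≤ padWidth lns →
    skipWhile (sepOf lns) (padWidth lns) false j =
      j + (((colsOf lns).drop j).takeWhile (fun d => !blankB d)).length := by
  intro n
  induction n using Nat.strong_induction_on with
  | _ n ih =>
    intro j hn hj
    by_cases hjw : j < padWidth lns
    · have hdrop : (colsOf lns).drop j = colAt lns j :: (colsOf lns).drop (j + 1) := by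
        rw [List.drop_eq_getElem_cons (by rw [cols_len]; omega), cols_getElem lns j hjw]
      by_cases hb : blankB (colAt lns j)
      · have hsep : (sepOf lns).getD j false = true := by rw [sep_getD lns j hjw, hb]
        rw [skipWhile, dif_neg (by rintro ⟨-, hc⟩; rw [hsep] at hc; cases hc)]
        rw [hdrop]
        simp [hb]
      · have hsep : (sepOf lns).getD j false = false := by
          rw [sep_getD lns j hjw]; simpa using hb
        rw [skipWhile, dif_pos ⟨hjw, hsep⟩]
        rw [ih (n - 1) (by omega) (j + 1) (by omega) (by omega)]
        rw [hdrop]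
        simp only [List.takeWhile_cons]
        simp [hb]
        omega
    · rw [skipWhile, dif_neg (by simp [hjw])]
      rw [List.drop_eq_nil_of_le (by rw [cols_len]; omega)]
      simp

theorem drop_takeWhile_len {α : Type} (p : α → Bool) (l : List α) :
    l.drop (l.takeWhile p).length = l.dropWhile p := by
  induction l with
  | nil => rfl
  | cons a t ih =>
    by_cases h : p a <;> simp [h, ih]

theorem blocksLoop_bounds (sep : List Bool) (w : Nat) :
    ∀ n j, w - j = n → j ≤ w →
    ∀ se ∈ blocksLoop sep w j, j ≤ se.1 ∧ se.1 < se.2 ∧ se.2 ≤ w := by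
  intro n
  induction n using Nat.strong_induction_on with
  | _ n ih =>
    intro j hn hj se hse
    rw [blocksLoop] at hse
    by_cases h1 : skipWhile sep w true j < w
    · rw [dif_pos h1] at hse
      have hle1 : j ≤ skipWhile sep w true j := skipWhile_le sep w true j
      have hsep : sep.getD (skipWhile sep w true j) false = false := by
        rcases Bool.eq_false_or_eq_true (sep.getD (skipWhile sep w true j) false) with h | h
        · exact absurd ⟨h1, h⟩ (skipWhile_post sep w true j)
        · exact h
      have hlt2 : skipWhile sep w true j + 1 ≤ skipWhile sep w false (skipWhile sep w true j) :=
        skipWhile_succ_le sep w false _ h1 hsep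
      have hle3 : skipWhile sep w false (skipWhile sep w true j) ≤ w :=
        skipWhile_le_w sep w false _ (by omega)
      rcases List.mem_cons.mp hse with rfl | hmem
      · exact ⟨hle1, by omega, hle3⟩
      · have := ih (w - skipWhile sep w false (skipWhile sep w true j)) (by omega)
          _ rfl (by omega) se hmem
        exact ⟨by omega, this.2.1, this.2.2⟩
    · rw [dif_neg h1] at hse
      simp at hse

-- A's block scan produces exactly the maximal non-blank runs of the column list
theorem blocksLoop_runs (lns : List (List Char)) :
    ∀ n j, padWidth lns - j = n → j ≤ padWidth lns →
    (blocksLoop (sepOf lns) (padWidth lns) j).map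
        (fun se => ((colsOf lns).drop se.1).take (se.2 - se.1)) =
      runs ((colsOf lns).drop j) := by
  intro n
  induction n using Nat.strong_induction_on with
  | _ n ih =>
    intro j hn hj
    by_cases hjw : j < padWidth lns
    · have hdrop : (colsOf lns).drop j = colAt lns j :: (colsOf lns).drop (j + 1) := by
        rw [List.drop_eq_getElem_cons (by rw [cols_len]; omega), cols_getElem lns j hjw]
      by_cases hb : blankB (colAt lns j)
      · have hsep : (sepOf lns).getD j false = true := by rw [sep_getD lns j hjw, hb]
        have hstep : skipWhile (sepOf lns) (padWidth lns) true j
            = skipWhile (sepOf lns) (padWidth lns) true (j + 1) := by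
          conv_lhs => rw [skipWhile]
          rw [dif_pos ⟨hjw, hsep⟩]
        have hbl : blocksLoop (sepOf lns) (padWidth lns) j
            = blocksLoop (sepOf lns) (padWidth lns) (j + 1) := by
          conv_lhs => rw [blocksLoop]
          conv_rhs => rw [blocksLoop]
          rw [hstep]
        rw [hbl, ih (n - 1) (by omega) (j + 1) (by omega) (by omega), hdrop,
          runs_cons_blank _ _ hb]
      · have hsep : (sepOf lns).getD j false = false := by
          rw [sep_getD lns j hjw]; simpa using hb
        have hstop : skipWhile (sepOf lns) (padWidth lns) true j = j := by
          rw [skipWhile, dif_neg (by rintro ⟨-, hc⟩; rw [hsep] at hc; cases hc)]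
        have hj2 : skipWhile (sepOf lns) (padWidth lns) false j =
            j + (((colsOf lns).drop j).takeWhile (fun d => !blankB d)).length :=
          skipFalse lns n j hn hj
        have hlen_pos : 1 ≤ (((colsOf lns).drop j).takeWhile (fun d => !blankB d)).length := by
          rw [hdrop]; simp [hb]
        have hlen_le : (((colsOf lns).drop j).takeWhile (fun d => !blankB d)).length
            ≤ padWidth lns - j := by
          have h1 := (List.takeWhile_prefix (l := (colsOf lns).drop j)
            (fun d => !blankB d)).length_le
          rw [List.length_drop, cols_len] at h1
          exact h1
        conv_lhs => rw [blocksLoop]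
        simp only [hstop, hj2]
        rw [dif_pos hjw, List.map_cons]
        have htake : ((colsOf lns).drop j).take
            ((j + (((colsOf lns).drop j).takeWhile (fun d => !blankB d)).length) - j) =
            ((colsOf lns).drop j).takeWhile (fun d => !blankB d) := by
          rw [show (j + (((colsOf lns).drop j).takeWhile (fun d => !blankB d)).length) - j =
            (((colsOf lns).drop j).takeWhile (fun d => !blankB d)).length by omega]
          exact (List.prefix_iff_eq_take.mp (List.takeWhile_prefix _)).symm
        rw [htake]
        have htail := ih (padWidth lns -
            (j + (((colsOf lns).drop j).takeWhile (fun d => !blankB d)).length))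
          (by omega) _ rfl (by omega)
        rw [htail]
        have hdrop2 : (colsOf lns).drop
            (j + (((colsOf lns).drop j).takeWhile (fun d => !blankB d)).length) =
            ((colsOf lns).drop j).dropWhile (fun d => !blankB d) := by
          rw [← List.drop_drop, drop_takeWhile_len]
        rw [hdrop2]
        conv_rhs => rw [hdrop, runs_cons_nonblank _ _ (by simpa using hb)]
        rw [hdrop]
        simp [hb]
    · have hstop : skipWhile (sepOf lns) (padWidth lns) true j = j := by
        rw [skipWhile, dif_neg (fun h => absurd h.1 hjw)]
      conv_lhs => rw [blocksLoop]
      simp only [hstop]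
      rw [dif_neg hjw, List.drop_eq_nil_of_le (by rw [cols_len]; omega)]
      simp [runs_nil]

theorem revmap (s : Nat) : ∀ n : Nat,
    List.map (fun k : Nat => (s : Int) + n - 1 + -1 * (k : Int)) (List.range n) =
      ((List.range' s n).map (fun k : Nat => (k : Int))).reverse := by
  intro n
  induction n with
  | zero => simp
  | succ n ih =>
    rw [List.range'_concat, List.range_succ_eq_map, List.map_cons, List.map_map,
      List.map_append, List.reverse_append]
    simp only [List.map_cons, List.map_nil, List.reverse_cons, List.reverse_nil,
      List.nil_append, List.singleton_append]
    congr 1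
    · push_cast; ring
    · rw [← ih]
      refine (List.map_congr_left (fun x _ => ?_)).symm
      simp only [Function.comp, Nat.succ_eq_add_one]
      push_cast; ring

-- range(e-1, s-1, -1) is the reversed increasing range
theorem pyRange_down (s n : Nat) :
    PySem.List.pyRange ((s : Int) + n - 1) ((s : Int) - 1) (-1) =
      ((List.range' s n).map (fun k : Nat => (k : Int))).reverse := by
  rcases Nat.eq_zero_or_pos n with rfl | hn
  · norm_num [PySem.List.pyRange]
  · rw [PySem.List.pyRange]
    rw [if_neg (by norm_num : ¬((-1:Int) = 0))]
    rw [if_neg (by norm_num : ¬((0:Int) < -1))]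
    rw [if_pos (show (s:Int) - 1 < (s:Int) + n - 1 by omega)]
    rw [show (((s:Int) + n - 1 - ((s:Int) - 1) + -(-1) - 1) / -(-1)).toNat = n by
      have h2 : ((s:Int) + n - 1 - ((s:Int) - 1) + -(-1) - 1) / -(-1) = (n : Int) := by
        norm_num
      rw [h2]; omega]
    exact revmap s n

-- the upper h-1 cells of column j, as A joins them, are the column minus its last char
theorem topcol_eq (lns : List (List Char)) (j : Nat) (hj : j < padWidth lns) :
    (List.range (lns.length - 1)).map (fun r => ((rowsOf lns).getD r []).getD j ' ') =
      (colAt lns j).dropLast := by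
  rw [List.dropLast_eq_take, colAt_len]
  refine List.ext_getElem (by simp [colAt_len]) (fun i h1 h2 => ?_)
  rw [List.getElem_take, List.getElem_map, List.getElem_range]
  have hi : i < lns.length := by simp at h1; omega
  rw [cell_eq lns i j hi hj]
  rw [show (colAt lns j)[i]'(by rw [colAt_len]; omega) =
    (colAt lns j).getD i ' ' from (List.getD_eq_getElem _ _ (by rw [colAt_len]; omega)).symm]
  rw [colAt_getD lns i j hi]

-- A's padded last row is the list of last characters of the columns
theorem lastRow_eq (lns : List (List Char)) (hh : lns ≠ []) :
    (rowsOf lns).getD (lns.length - 1) [] =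
      (colsOf lns).map (fun c => c.getD (c.length - 1) ' ') := by
  have hh1 : 0 < lns.length := List.length_pos_iff.mpr hh
  have hl : ((rowsOf lns).getD (lns.length - 1) []).length = padWidth lns :=
    rows_len lns _ (by omega)
  refine List.ext_getElem (by rw [hl]; simp [cols_len]) (fun j h1 h2 => ?_)
  have hj : j < padWidth lns := by rw [hl] at h1; exact h1
  rw [List.getElem_map, cols_getElem lns j hj, colAt_len]
  rw [show ((rowsOf lns).getD (lns.length - 1) [])[j] =
    ((rowsOf lns).getD (lns.length - 1) []).getD j ' ' from
    (List.getD_eq_getElem _ _ h1).symm]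
  rw [cell_eq lns _ j (by omega) hj, colAt_getD lns _ j (by omega)]

theorem block_eq (lns : List (List Char)) (s e : Nat) (he : e ≤ padWidth lns) :
    ((colsOf lns).drop s).take (e - s) =
      (List.range' s (e - s)).map (fun j => colAt lns j) := by
  refine List.ext_getElem (by simp [cols_len]; omega) (fun i h1 h2 => ?_)
  have hi : i < e - s := by simpa using h2
  have hsw : s + i < padWidth lns := by omega
  rw [List.getElem_take, List.getElem_drop, List.getElem_map, List.getElem_range']
  rw [show (colsOf lns)[s + i]'(by rw [cols_len]; omega) = colAt lns (s + i) from
    cols_getElem lns (s + i) hsw]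
  congr 1
  omega

-- per-block: A's value at (s, e) is the reference value of the corresponding column run
theorem valA_eq (lns : List (List Char)) (hh : lns ≠ []) (se : Nat × Nat)
    (hs : se.1 < se.2) (he : se.2 ≤ padWidth lns) :
    valA lns se = blockValue (((colsOf lns).drop se.1).take (se.2 - se.1)) := by
  obtain ⟨s, e⟩ := se
  simp only at hs he
  have hh1 : 0 < lns.length := List.length_pos_iff.mpr hh
  rw [valA, blockValue, opOf, numsOf, block_eq lns s e he]
  dsimp only
  have hop : PySem.List.slice ((rowsOf lns).getD (lns.length - 1) [])
      (some (s : Int)) (some (e : Int))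
      = ((List.range' s (e - s)).map (fun j => colAt lns j)).map
          (fun c => c.getD (c.length - 1) ' ') := by
    rw [PySem.List.slice_natCast, lastRow_eq lns hh, ← block_eq lns s e he]
    rw [List.map_take, List.map_drop]
  rw [hop]
  have hrange2 : PySem.List.pyRange ((e : Int) - 1) ((s : Int) - 1) (-1)
      = ((List.range' s (e - s)).map (fun k : Nat => (k : Int))).reverse := by
    rw [show ((e : Int) - 1) = ((s : Int) + ((e - s : Nat) : Int) - 1) by omega]
    exact pyRange_down s (e - s)
  rw [hrange2]
  rw [show (fun (ns : List Int) (col : Int) =>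
        have s' := PySem.Chars.strip (PySem.Chars.join []
          (List.map (fun r => [((rowsOf lns).getD r []).getD col.toNat ' '])
            (List.range (lns.length - 1))))
        if (s' != []) = true then ns ++ [(PySem.Int.ofChars? s').getD 0] else ns)
      = (fun (ns : List Int) (col : Int) =>
        if (fun (col : Int) => PySem.Chars.strip (PySem.Chars.join []
            (List.map (fun r => [((rowsOf lns).getD r []).getD col.toNat ' '])
              (List.range (lns.length - 1)))) != []) col = true
        then ns ++ [(fun (col : Int) => (PySem.Int.ofChars? (PySem.Chars.strip
          (PySem.Chars.join [] (List.map (fun r => [((rowsOf lns).getD r []).getD col.toNat ' '])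
            (List.range (lns.length - 1)))))).getD 0) col]
        else ns) from rfl]
  rw [PySem.List.foldl_append_if]
  simp only [List.nil_append, List.filter_reverse, List.map_reverse, List.filter_map,
    List.map_map]
  have hcol : ∀ k : Nat, k < padWidth lns →
      PySem.Chars.strip (PySem.Chars.join []
        (List.map (fun r => [((rowsOf lns).getD r []).getD ((k : Int)).toNat ' '])
          (List.range (lns.length - 1)))) = PySem.Chars.strip ((colAt lns k).dropLast) := by
    intro k hk
    simp only [Int.toNat_natCast]
    rw [show List.map (fun r => [((rowsOf lns).getD r []).getD k ' '])
          (List.range (lns.length - 1))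
        = (List.map (fun r => ((rowsOf lns).getD r []).getD k ' ')
            (List.range (lns.length - 1))).map (fun c => [c]) from by rw [List.map_map]; rfl]
    rw [PySem.Chars.join_nil_singletons, topcol_eq lns k hk]
  have hfilter : List.filter ((fun col : Int => PySem.Chars.strip (PySem.Chars.join []
        (List.map (fun r => [((rowsOf lns).getD r []).getD col.toNat ' '])
          (List.range (lns.length - 1)))) != []) ∘ fun k : Nat => (k : Int))
      (List.range' s (e - s))
      = List.filter ((fun c => PySem.Chars.strip c.dropLast != []) ∘ fun j => colAt lns j)
        (List.range' s (e - s)) := by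
    refine List.filter_congr (fun k hk => ?_)
    have hkw : k < padWidth lns := by
      have h3 := List.mem_range'_1.mp hk
      omega
    simp only [Function.comp_apply]
    rw [hcol k hkw]
  have hmap : List.map ((fun col : Int => (PySem.Int.ofChars? (PySem.Chars.strip
        (PySem.Chars.join [] (List.map (fun r => [((rowsOf lns).getD r []).getD col.toNat ' '])
          (List.range (lns.length - 1)))))).getD 0) ∘ fun k : Nat => (k : Int))
      (List.filter ((fun c => PySem.Chars.strip c.dropLast != []) ∘ fun j => colAt lns j)
        (List.range' s (e - s)))
      = List.map ((fun c => (PySem.Int.ofChars? (PySem.Chars.strip c.dropLast)).getD 0) ∘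
          fun j => colAt lns j)
        (List.filter ((fun c => PySem.Chars.strip c.dropLast != []) ∘ fun j => colAt lns j)
          (List.range' s (e - s))) := by
    refine List.map_congr_left (fun k hk => ?_)
    have hkw : k < padWidth lns := by
      have h3 := List.mem_range'_1.mp (List.mem_of_mem_filter hk)
      omega
    simp only [Function.comp_apply]
    rw [hcol k hkw]
  rw [hfilter, hmap]
  by_cases hcase : (List.find? (fun c => c != ' ')
      (List.map ((fun c => c.getD (c.length - 1) ' ') ∘ fun j => colAt lns j)
        (List.range' s (e - s))) == some '+') = true
  · rw [if_pos hcase, if_pos hcase, List.sum_reverse]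
  · rw [if_neg hcase, if_neg hcase, ← List.prod_eq_foldl, List.prod_reverse]

-- B's streaming fold, characterised against the reference runs decomposition
theorem stream_eq (cols : List (List Char)) :
    ∀ st : BState, (st.inBlock = false → st.op = none ∧ st.s = 0 ∧ st.p = 1) →
    bFinish (cols.foldl bStep st) =
      (if st.inBlock then
        st.total +
          (if (if st.op = none then opOf (cols.takeWhile (fun d => !blankB d)) else st.op)
              == some '+'
           then st.s + (numsOf (cols.takeWhile (fun d => !blankB d))).sum
           else st.p * (numsOf (cols.takeWhile (fun d => !blankB d))).prod)
          + ((runs (cols.dropWhile (fun d => !blankB d))).map blockValue).sum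
       else st.total + ((runs cols).map blockValue).sum) := by
  induction cols with
  | nil =>
    intro st hst
    simp only [List.foldl_nil, List.takeWhile_nil, List.dropWhile_nil, runs_nil,
      List.map_nil, List.sum_nil, add_zero]
    by_cases hib : st.inBlock
    · rw [if_pos hib, bFinish, if_pos hib]
      rcases hop : st.op with _ | x
      · simp [opOf, numsOf]
      · by_cases hx : x = '+'
        · simp [numsOf, hx]
        · simp [numsOf, beq_iff_eq, hx]
    · rw [if_neg hib, bFinish, if_neg hib]
  | cons c cs ih =>
    intro st hst
    rw [List.foldl_cons]
    by_cases hb : blankB c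
    · have hall : c.all (fun x => x == ' ') = true := by rw [← blankB_eq_all]; exact hb
      have hstep : bStep st c =
          { total := bFinish st, inBlock := false, op := none, s := 0, p := 1 } := by
        rw [bStep, if_pos hall, bFinish]
      rw [hstep, ih _ (by intro; exact ⟨rfl, rfl, rfl⟩)]
      simp only [Bool.false_eq_true, if_false]
      have htake : (c :: cs).takeWhile (fun d => !blankB d) = [] := by simp [hb]
      have hdropw : (c :: cs).dropWhile (fun d => !blankB d) = c :: cs := by simp [hb]
      by_cases hib : st.inBlock
      · rw [if_pos hib, htake, hdropw, runs_cons_blank _ _ hb, bFinish, if_pos hib]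
        rcases hop : st.op with _ | x
        · simp [opOf, numsOf]
        · by_cases hx : x = '+'
          · simp [numsOf, hx]
          · simp [numsOf, beq_iff_eq, hx]
      · rw [if_neg hib, bFinish, if_neg hib, runs_cons_blank _ _ hb]
    · have hall : c.all (fun x => x == ' ') = false := by
        rw [← blankB_eq_all]; simpa using hb
      have htake : (c :: cs).takeWhile (fun d => !blankB d) =
          c :: cs.takeWhile (fun d => !blankB d) := by simp [hb]
      have hdropw : (c :: cs).dropWhile (fun d => !blankB d) =
          cs.dropWhile (fun d => !blankB d) := by simp [hb]
      have hopcons : opOf (c :: cs.takeWhile (fun d => !blankB d)) =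
          if (c.getD (c.length - 1) ' ' != ' ') = true then some (c.getD (c.length - 1) ' ')
          else opOf (cs.takeWhile (fun d => !blankB d)) := by
        by_cases hl : (c.getD (c.length - 1) ' ' != ' ') = true
        · rw [opOf, List.map_cons,
            List.find?_cons_of_pos (p := fun ch => ch != ' ') hl, if_pos hl]
        · rw [opOf, List.map_cons,
            List.find?_cons_of_neg (p := fun ch => ch != ' ') (by simpa using hl),
            if_neg hl, opOf]
      have hnumscons : numsOf (c :: cs.takeWhile (fun d => !blankB d)) =
          if (PySem.Chars.strip c.dropLast != []) = true
          then (PySem.Int.ofChars? (PySem.Chars.strip c.dropLast)).getD 0 ::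
            numsOf (cs.takeWhile (fun d => !blankB d))
          else numsOf (cs.takeWhile (fun d => !blankB d)) := by
        by_cases hn : (PySem.Chars.strip c.dropLast != []) = true
        · rw [numsOf, List.filter_cons, if_pos hn, if_pos hn, List.map_cons, numsOf]
        · rw [numsOf, List.filter_cons, if_neg hn, if_neg hn, numsOf]
      have hopeq : (if (if st.op == none && (c.getD (c.length - 1) ' ' != ' ')
              then some (c.getD (c.length - 1) ' ') else st.op) = none
            then opOf (cs.takeWhile (fun d => !blankB d))
            else (if st.op == none && (c.getD (c.length - 1) ' ' != ' ')
              then some (c.getD (c.length - 1) ' ') else st.op)) =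
          if st.op = none then
            (if (c.getD (c.length - 1) ' ' != ' ') = true then some (c.getD (c.length - 1) ' ')
             else opOf (cs.takeWhile (fun d => !blankB d)))
          else st.op := by
        rcases hop : st.op with _ | x
        · split_ifs <;> simp_all
        · simp
      by_cases hn : (PySem.Chars.strip c.dropLast != []) = true
      · have hstep : bStep st c = ⟨st.total, true,
            (if st.op == none && (c.getD (c.length - 1) ' ' != ' ')
              then some (c.getD (c.length - 1) ' ') else st.op),
            st.s + (PySem.Int.ofChars? (PySem.Chars.strip c.dropLast)).getD 0,
            st.p * (PySem.Int.ofChars? (PySem.Chars.strip c.dropLast)).getD 0⟩ := by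
          rw [bStep, if_neg (by simp [hall])]
          dsimp only
          rw [if_pos hn]
        rw [hstep, ih _ (by intro h; cases h)]
        rw [if_pos rfl]
        dsimp only
        rw [hopeq, htake, hdropw, hopcons, hnumscons, if_pos hn]
        by_cases hib : st.inBlock
        · rw [if_pos hib]
          by_cases hc2 : ((if st.op = none then
                (if (c.getD (c.length - 1) ' ' != ' ') = true
                 then some (c.getD (c.length - 1) ' ')
                 else opOf (cs.takeWhile (fun d => !blankB d)))
              else st.op) == some '+') = true
          · rw [if_pos hc2, if_pos hc2]
            simp only [List.sum_cons]; ring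
          · rw [if_neg hc2, if_neg hc2]
            simp only [List.prod_cons]; ring
        · obtain ⟨h1, h2, h3⟩ := hst (by simpa using hib)
          rw [if_neg hib, h1, h2, h3, if_pos rfl,
            runs_cons_nonblank _ _ (by simpa using hb), List.map_cons, List.sum_cons,
            blockValue, hopcons, hnumscons, if_pos hn]
          by_cases hc2 : ((if (c.getD (c.length - 1) ' ' != ' ') = true
                then some (c.getD (c.length - 1) ' ')
                else opOf (cs.takeWhile (fun d => !blankB d))) == some '+') = true
          · rw [if_pos hc2, if_pos hc2]
            simp only [List.sum_cons]; ring
          · rw [if_neg hc2, if_neg hc2]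
            simp only [List.prod_cons]; ring
      · have hstep : bStep st c = ⟨st.total, true,
            (if st.op == none && (c.getD (c.length - 1) ' ' != ' ')
              then some (c.getD (c.length - 1) ' ') else st.op),
            st.s, st.p⟩ := by
          rw [bStep, if_neg (by simp [hall])]
          dsimp only
          rw [if_neg hn]
        rw [hstep, ih _ (by intro h; cases h)]
        rw [if_pos rfl]
        dsimp only
        rw [hopeq, htake, hdropw, hopcons, hnumscons, if_neg hn]
        by_cases hib : st.inBlock
        · rw [if_pos hib]
        · obtain ⟨h1, h2, h3⟩ := hst (by simpa using hib)
          rw [if_neg hib, h1, h2, h3, if_pos rfl,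
            runs_cons_nonblank _ _ (by simpa using hb), List.map_cons, List.sum_cons,
            blockValue, hopcons, hnumscons, if_neg hn]
          by_cases hc2 : ((if (c.getD (c.length - 1) ' ' != ' ') = true
                then some (c.getD (c.length - 1) ' ')
                else opOf (cs.takeWhile (fun d => !blankB d))) == some '+') = true
          · rw [if_pos hc2, if_pos hc2]
            ring
          · rw [if_neg hc2, if_neg hc2]
            ring

theorem solve_alt_eq (lines : List String) :
    solve_alt lines = ((runs (colsOf (cleanLines lines))).map blockValue).sum := by
  rw [show solve_alt lines = bFinish ((colsOf (cleanLines lines)).foldl bStep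
    { total := 0, inBlock := false, op := none, s := 0, p := 1 }) from rfl]
  rw [stream_eq _ _ (by intro; exact ⟨rfl, rfl, rfl⟩)]
  simp

-- ===== VERDICT (by name: the statement is the Claim_ definition above) =====
theorem solve_spec : Claim_equal_solve := by
  intro lines _hdom hpre
  obtain ⟨h1, _h2⟩ := hpre
  unfold Spec_solve
  rw [solve_eq, solve_alt_eq]
  rw [show (fun (total : Int) (se : Nat × Nat) => total + valA (cleanLines lines) se) =
      (fun (acc : Int) x => acc + (fun se => valA (cleanLines lines) se) x) from rfl]
  rw [PySem.List.foldl_add]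
  rw [List.map_congr_left (fun se hse =>
    valA_eq (cleanLines lines) h1 se
      ((blocksLoop_bounds _ _ _ 0 rfl (Nat.zero_le _) se hse).2.1)
      ((blocksLoop_bounds _ _ _ 0 rfl (Nat.zero_le _) se hse).2.2))]
  rw [show (fun se : Nat × Nat =>
      blockValue (((colsOf (cleanLines lines)).drop se.1).take (se.2 - se.1))) =
      (blockValue ∘ fun se : Nat × Nat =>
        ((colsOf (cleanLines lines)).drop se.1).take (se.2 - se.1)) from rfl]
  rw [← List.map_map, blocksLoop_runs (cleanLines lines) _ 0 rfl (Nat.zero_le _)]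
  simp
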